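-- pv_equiv track=rewrite | github.com/ahmednasr999/opportunity-engine | src/ai_cv_rewriter.py | _find_matching_experience
-- ===== SOURCE A (Python) =====
-- from typing import Dict, List, Optional
--
-- def _find_matching_experience(requirement: str, profile: Dict) -> str:
--     """Find experience that matches a requirement"""
--     req_lower = requirement.lower()
--
--     # Keyword matching
--     if any(word in req_lower for word in ['leadership', 'team', 'manage']):
--         return f"Your requirement for {requirement.split()[0]} leadership aligns perfectly with my experience leading cross-functional teams of 50+ professionals across multiple countries, most recently at Saudi German Hospital Group where I established PMO frameworks managing $50M+ in projects."
--
--     if any(word in req_lower for word in ['healthcare', 'health', 'clinical']):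
--         return f"Regarding {requirement[:30]}..., I have successfully implemented HealthTech solutions across 12+ hospital facilities, including AI-driven Clinical Decision Support systems and Health Catalyst analytics platforms that improved patient outcomes by 35%."
--
--     if any(word in req_lower for word in ['digital', 'transformation', 'technology']):
--         return f"My background in {requirement[:30]}... includes leading enterprise-wide digital transformations at both PaySky and El Araby Group, where I delivered SAP S/4HANA implementations and modernized operational systems serving millions of users."
--
--     if any(word in req_lower for word in ['strategy', 'strategic']):
--         return f"In terms of {requirement[:30]}..., I have advised C-suite executives on multi-year strategic plans, market expansion strategies, and digital innovation roadmaps that delivered measurable ROI across FinTech and healthcare sectors."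
--
--     return f"Your requirement for {requirement[:40]}... resonates with my experience driving operational excellence and delivering complex initiatives on time and under budget across diverse industries."
-- ===== SOURCE B (Python) =====
-- # B: instead of an ordered if-ladder with first-match, flatten all keywords into a
-- # keyword->category map, compute in one pass the MINIMUM category index among the
-- # keywords present in the lowered requirement (default 4 = fallback), then index a
-- # template table.  Correct because first-match over ordered groups = min group index present.
--
-- _KEYWORD_CATEGORY = {
--     'leadership': 0, 'team': 0, 'manage': 0,
--     'healthcare': 1, 'health': 1, 'clinical': 1,
--     'digital': 2, 'transformation': 2, 'technology': 2,
--     'strategy': 3, 'strategic': 3,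
-- }
--
-- _TEMPLATES = [
--     lambda r: f"Your requirement for {r.split()[0]} leadership aligns perfectly with my experience leading cross-functional teams of 50+ professionals across multiple countries, most recently at Saudi German Hospital Group where I established PMO frameworks managing $50M+ in projects.",
--     lambda r: f"Regarding {r[:30]}..., I have successfully implemented HealthTech solutions across 12+ hospital facilities, including AI-driven Clinical Decision Support systems and Health Catalyst analytics platforms that improved patient outcomes by 35%.",
--     lambda r: f"My background in {r[:30]}... includes leading enterprise-wide digital transformations at both PaySky and El Araby Group, where I delivered SAP S/4HANA implementations and modernized operational systems serving millions of users.",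
--     lambda r: f"In terms of {r[:30]}..., I have advised C-suite executives on multi-year strategic plans, market expansion strategies, and digital innovation roadmaps that delivered measurable ROI across FinTech and healthcare sectors.",
--     lambda r: f"Your requirement for {r[:40]}... resonates with my experience driving operational excellence and delivering complex initiatives on time and under budget across diverse industries.",
-- ]
--
--
-- def _find_matching_experience(requirement: str, profile) -> str:
--     req_lower = requirement.lower()
--     cat = min((c for kw, c in _KEYWORD_CATEGORY.items() if kw in req_lower), default=4)
--     return _TEMPLATES[cat](requirement)
-- ===== Notes on version B (the rewrite author's own statement) =====
-- stated objective: alternative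
-- what changed: Replaces the ordered if-ladder of keyword groups (return at first matching group) with a single pass over a flat keyword-to-category map computing the minimum matching category index, then indexing a template table.
import Mathlib
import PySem

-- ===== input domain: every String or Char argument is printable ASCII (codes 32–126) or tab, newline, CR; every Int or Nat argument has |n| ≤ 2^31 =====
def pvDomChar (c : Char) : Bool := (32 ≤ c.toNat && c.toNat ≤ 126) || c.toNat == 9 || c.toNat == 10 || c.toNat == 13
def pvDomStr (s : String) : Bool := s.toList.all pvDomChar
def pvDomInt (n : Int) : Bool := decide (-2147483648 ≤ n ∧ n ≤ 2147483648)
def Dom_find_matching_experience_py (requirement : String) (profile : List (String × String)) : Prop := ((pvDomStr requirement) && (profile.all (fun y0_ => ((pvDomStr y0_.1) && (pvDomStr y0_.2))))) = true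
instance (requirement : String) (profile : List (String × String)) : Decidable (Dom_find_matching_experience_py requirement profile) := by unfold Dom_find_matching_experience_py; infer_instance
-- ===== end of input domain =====

-- B replaces A's ordered if-ladder of keyword groups by one pass over a flat keyword->category
-- map taking the minimum matching category index, then indexing a template table (objective: alternative; same cost).


-- ===== PORT A =====
-- requirement.split()[0] is only reached when a keyword matched, so split₀ is nonempty there;
-- headD "" is exact on every input where Python returns (it never raises there).
def find_matching_experience_py (requirement : String) (profile : List (String × String)) : String :=
  let req_lower := PySem.Str.lower requirement
  if ["leadership", "team", "manage"].any (fun word => PySem.Str.isIn word req_lower) then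
    "Your requirement for " ++ (PySem.Str.split₀ requirement).headD "" ++ " leadership aligns perfectly with my experience leading cross-functional teams of 50+ professionals across multiple countries, most recently at Saudi German Hospital Group where I established PMO frameworks managing $50M+ in projects."
  else if ["healthcare", "health", "clinical"].any (fun word => PySem.Str.isIn word req_lower) then
    "Regarding " ++ PySem.Str.slice requirement none (some 30) ++ "..., I have successfully implemented HealthTech solutions across 12+ hospital facilities, including AI-driven Clinical Decision Support systems and Health Catalyst analytics platforms that improved patient outcomes by 35%."
  else if ["digital", "transformation", "technology"].any (fun word => PySem.Str.isIn word req_lower) then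
    "My background in " ++ PySem.Str.slice requirement none (some 30) ++ "... includes leading enterprise-wide digital transformations at both PaySky and El Araby Group, where I delivered SAP S/4HANA implementations and modernized operational systems serving millions of users."
  else if ["strategy", "strategic"].any (fun word => PySem.Str.isIn word req_lower) then
    "In terms of " ++ PySem.Str.slice requirement none (some 30) ++ "..., I have advised C-suite executives on multi-year strategic plans, market expansion strategies, and digital innovation roadmaps that delivered measurable ROI across FinTech and healthcare sectors."
  else
    "Your requirement for " ++ PySem.Str.slice requirement none (some 40) ++ "... resonates with my experience driving operational excellence and delivering complex initiatives on time and under budget across diverse industries."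

-- ===== PORT B =====
-- the flat keyword -> category map of Source B (insertion order)
def pvKeywordCategory : List (String × Nat) :=
  [("leadership", 0), ("team", 0), ("manage", 0),
   ("healthcare", 1), ("health", 1), ("clinical", 1),
   ("digital", 2), ("transformation", 2), ("technology", 2),
   ("strategy", 3), ("strategic", 3)]

-- min(..., default=4) over the categories of matching keywords
def pvMinCat (req_lower : String) : Nat :=
  pvKeywordCategory.foldl
    (fun acc p => if PySem.Str.isIn p.1 req_lower then min acc p.2 else acc) 4

-- the template table of Source B, indexed by category (4 = fallback)
def pvTemplate (cat : Nat) (r : String) : String :=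
  match cat with
  | 0 => "Your requirement for " ++ (PySem.Str.split₀ r).headD "" ++ " leadership aligns perfectly with my experience leading cross-functional teams of 50+ professionals across multiple countries, most recently at Saudi German Hospital Group where I established PMO frameworks managing $50M+ in projects."
  | 1 => "Regarding " ++ PySem.Str.slice r none (some 30) ++ "..., I have successfully implemented HealthTech solutions across 12+ hospital facilities, including AI-driven Clinical Decision Support systems and Health Catalyst analytics platforms that improved patient outcomes by 35%."
  | 2 => "My background in " ++ PySem.Str.slice r none (some 30) ++ "... includes leading enterprise-wide digital transformations at both PaySky and El Araby Group, where I delivered SAP S/4HANA implementations and modernized operational systems serving millions of users."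
  | 3 => "In terms of " ++ PySem.Str.slice r none (some 30) ++ "..., I have advised C-suite executives on multi-year strategic plans, market expansion strategies, and digital innovation roadmaps that delivered measurable ROI across FinTech and healthcare sectors."
  | _ => "Your requirement for " ++ PySem.Str.slice r none (some 40) ++ "... resonates with my experience driving operational excellence and delivering complex initiatives on time and under budget across diverse industries."

def find_matching_experience_py_alt (requirement : String) (profile : List (String × String)) : String :=
  let req_lower := PySem.Str.lower requirement
  pvTemplate (pvMinCat req_lower) requirement

-- ===== PRECONDITION & SPEC =====
def Spec_find_matching_experience_py (requirement : String) (profile : List (String × String)) (out : String) : Prop := out = find_matching_experience_py_alt requirement profile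
instance (requirement : String) (profile : List (String × String)) (out : String) : Decidable (Spec_find_matching_experience_py requirement profile out) := by unfold Spec_find_matching_experience_py; infer_instance

-- ===== CLAIM =====
def Claim_equal_find_matching_experience_py : Prop := ∀ (requirement : String) (profile : List (String × String)), Dom_find_matching_experience_py requirement profile → Spec_find_matching_experience_py requirement profile (find_matching_experience_py requirement profile)

-- ===== LEMMAS AND PROOFS =====

lemma pvMinCat_eq (rl : String) : pvMinCat rl =
    (if ["leadership", "team", "manage"].any (fun word => PySem.Str.isIn word rl) then 0
     else if ["healthcare", "health", "clinical"].any (fun word => PySem.Str.isIn word rl) then 1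
     else if ["digital", "transformation", "technology"].any (fun word => PySem.Str.isIn word rl) then 2
     else if ["strategy", "strategic"].any (fun word => PySem.Str.isIn word rl) then 3
     else 4) := by
  simp only [pvMinCat, pvKeywordCategory, List.foldl, List.any_cons, List.any_nil, Bool.or_false]
  generalize PySem.Str.isIn "leadership" rl = b1
  generalize PySem.Str.isIn "team" rl = b2
  generalize PySem.Str.isIn "manage" rl = b3
  generalize PySem.Str.isIn "healthcare" rl = b4
  generalize PySem.Str.isIn "health" rl = b5
  generalize PySem.Str.isIn "clinical" rl = b6
  generalize PySem.Str.isIn "digital" rl = b7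
  generalize PySem.Str.isIn "transformation" rl = b8
  generalize PySem.Str.isIn "technology" rl = b9
  generalize PySem.Str.isIn "strategy" rl = b10
  generalize PySem.Str.isIn "strategic" rl = b11
  revert b1 b2 b3 b4 b5 b6 b7 b8 b9 b10 b11
  decide

-- ===== VERDICT =====
theorem find_matching_experience_py_spec : Claim_equal_find_matching_experience_py := by
  intro requirement profile _
  show find_matching_experience_py requirement profile = _
  simp only [find_matching_experience_py, find_matching_experience_py_alt]
  rw [pvMinCat_eq]
  split_ifs <;> rfl
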